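-- pv_equiv track=rewrite | github.com/SuperInstance/quality-gate-stream | artifacts/py/modelexperiment-2-code-generation-results.py | validate_deadband_protocol
-- ===== SOURCE A (Python) =====
-- def validate_deadband_protocol(steps: list[str]) -> tuple[bool, str]:
--     """
--     Validates if a list of steps follows the Deadband Protocol priority order.
--     Rules:
--     1. At least one step must start with "P0:" (case-sensitive).
--     2. No step starting with "P2:" may appear before a step starting with "P1:".
--     Returns a tuple (is_valid, error_message).
--     """
--     has_p0 = any(step.strip().startswith("P0:") for step in steps)
--     if not has_p0:
--         return False, "P0 step missing"
--
--     seen_p1 = False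
--     for step in steps:
--         if step.strip().startswith("P1:"):
--             seen_p1 = True
--         if step.strip().startswith("P2:") and not seen_p1:
--             return False, "P2 before P1"
--
--     return True, ""
-- ===== SOURCE B (Python) =====
-- def validate_deadband_protocol(steps: list[str]) -> tuple[bool, str]:
--     if not any(step.strip().startswith("P0:") for step in steps):
--         return False, "P0 step missing"
--     first_p1 = next((i for i, s in enumerate(steps) if s.strip().startswith("P1:")), len(steps))
--     first_p2 = next((i for i, s in enumerate(steps) if s.strip().startswith("P2:")), len(steps))
--     if first_p2 < first_p1:
--         return False, "P2 before P1"
--     return True, ""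
-- ===== Notes on version B (the rewrite author's own statement) =====
-- stated objective: alternative
-- what changed: Replaces the stateful seen_p1 loop with a comparison of the first-occurrence indices of P1: and P2: steps (two independent scans instead of one flag-carrying loop).
import Mathlib
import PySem

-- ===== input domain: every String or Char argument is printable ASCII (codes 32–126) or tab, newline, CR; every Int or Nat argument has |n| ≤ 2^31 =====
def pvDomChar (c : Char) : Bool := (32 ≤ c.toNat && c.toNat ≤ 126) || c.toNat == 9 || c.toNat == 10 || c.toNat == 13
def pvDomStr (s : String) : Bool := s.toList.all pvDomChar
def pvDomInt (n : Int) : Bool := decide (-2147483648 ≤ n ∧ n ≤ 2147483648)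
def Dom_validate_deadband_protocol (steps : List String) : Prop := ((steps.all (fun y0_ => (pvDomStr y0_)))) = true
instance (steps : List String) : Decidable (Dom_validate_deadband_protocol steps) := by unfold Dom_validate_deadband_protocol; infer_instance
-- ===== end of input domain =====

-- B replaces A's flag-carrying loop by comparing the first-occurrence indices of "P1:" and "P2:" steps (alternative decomposition, same cost).

-- ===== PORT A =====
-- the for-loop of A carrying the seen_p1 flag
def vdbLoopA (steps : List String) (seen_p1 : Bool) : Bool × String :=
  match steps with
  | [] => (true, "")
  | step :: rest =>
    let seen := if PySem.Str.startswith (PySem.Str.strip step) "P1:" then true else seen_p1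
    if PySem.Str.startswith (PySem.Str.strip step) "P2:" && !seen then (false, "P2 before P1")
    else vdbLoopA rest seen

def validate_deadband_protocol (steps : List String) : Bool × String :=
  let has_p0 := steps.any (fun step => PySem.Str.startswith (PySem.Str.strip step) "P0:")
  if !has_p0 then (false, "P0 step missing")
  else vdbLoopA steps false

-- ===== PORT B =====
-- next((i for i,s in enumerate(steps) if s.strip().startswith(p)), len(steps)); List.findIdx returns length when absent
def firstIdxWith (steps : List String) (p : String) : Nat :=
  steps.findIdx (fun s => PySem.Str.startswith (PySem.Str.strip s) p)

def validate_deadband_protocol_alt (steps : List String) : Bool × String :=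
  if !(steps.any (fun step => PySem.Str.startswith (PySem.Str.strip step) "P0:")) then
    (false, "P0 step missing")
  else
    let first_p1 := firstIdxWith steps "P1:"
    let first_p2 := firstIdxWith steps "P2:"
    if first_p2 < first_p1 then (false, "P2 before P1") else (true, "")

-- ===== PRECONDITION & SPEC =====
def Spec_validate_deadband_protocol (steps : List String) (out : Bool × String) : Prop := out = validate_deadband_protocol_alt steps
instance (steps : List String) (out : Bool × String) : Decidable (Spec_validate_deadband_protocol steps out) := by unfold Spec_validate_deadband_protocol; infer_instance

-- ===== CLAIM (what is proved, stated in full; the proofs are below) =====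
def Claim_equal_validate_deadband_protocol : Prop := ∀ (steps : List String), Dom_validate_deadband_protocol steps → Spec_validate_deadband_protocol steps (validate_deadband_protocol steps)

-- ===== LEMMAS AND PROOFS =====

-- a character list starting with "P2:" does not start with "P1:"
theorem not_p1_of_p2 (l : List Char) (h2 : PySem.Chars.startswith l ['P','2',':'] = true) :
    PySem.Chars.startswith l ['P','1',':'] = false := by
  by_contra h
  rw [Bool.not_eq_false] at h
  rw [PySem.Chars.startswith_iff] at h2 h
  obtain ⟨u, hu⟩ := h
  obtain ⟨v, hv⟩ := h2
  rw [← hu] at hv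
  simp at hv

-- string version of the previous lemma
theorem not_p1_of_p2S (t : String) (h2 : PySem.Str.startswith t "P2:" = true) :
    PySem.Str.startswith t "P1:" = false := by
  rw [PySem.Str.startswith_eq] at h2 ⊢
  have e1 : "P1:".toList = ['P','1',':'] := by decide
  have e2 : "P2:".toList = ['P','2',':'] := by decide
  rw [e1]
  rw [e2] at h2
  exact not_p1_of_p2 _ h2

-- once seen_p1 is true the loop always returns (true, "")
theorem vdbLoopA_true (steps : List String) : vdbLoopA steps true = (true, "") := by
  induction steps with
  | nil => rfl
  | cons s rest ih =>
    simp only [vdbLoopA]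
    split <;> simp_all

-- the flag-carrying loop equals the first-index comparison
theorem vdbLoopA_eq_idx (steps : List String) :
    vdbLoopA steps false =
      (if firstIdxWith steps "P2:" < firstIdxWith steps "P1:" then (false, "P2 before P1") else (true, "")) := by
  induction steps with
  | nil => rfl
  | cons s rest ih =>
    rw [vdbLoopA]
    rw [firstIdxWith, firstIdxWith, List.findIdx_cons, List.findIdx_cons]
    by_cases h2 : PySem.Str.startswith (PySem.Str.strip s) "P2:" = true
    · have h1 := not_p1_of_p2S _ h2
      rw [h2, h1]
      simp
    · rw [Bool.not_eq_true] at h2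
      rw [h2]
      by_cases h1 : PySem.Str.startswith (PySem.Str.strip s) "P1:" = true
      · rw [h1]
        simp [vdbLoopA_true]
      · rw [Bool.not_eq_true] at h1
        rw [h1]
        simp only [cond_false, Bool.false_and, if_neg (Bool.false_ne_true)]
        rw [ih, firstIdxWith, firstIdxWith]
        simp

-- ===== VERDICT (by name: the statement is the Claim_ definition above) =====
theorem validate_deadband_protocol_spec : Claim_equal_validate_deadband_protocol := by
  intro steps _
  show validate_deadband_protocol steps = validate_deadband_protocol_alt steps
  unfold validate_deadband_protocol validate_deadband_protocol_alt
  dsimp only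
  split_ifs with hp hq
  · rfl
  · rw [vdbLoopA_eq_idx, if_pos hq]
  · rw [vdbLoopA_eq_idx, if_neg hq]
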